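-- pv_equiv track=rewrite | github.com/daniel-reich/ubiquitous-fiesta | TZXG9RfcZ7T3o43QF_12.py | same_length
-- ===== SOURCE A (Python) =====
-- def same_length(txt):
--     count = 0
--     increasing = True
--     for i in txt:
--         if i == "1":
--             if not increasing:
--                 if count != 0:
--                     return False
--                 increasing = True
--             count += 1
--         elif i == "0":
--             increasing = False
--             count -= 1
--     if count == 0:
--         return True
--     return False
-- ===== SOURCE B (Python) =====
-- def _runs(chars):
--     """Run-length encode: list of (char, run length) pairs."""
--     runs = []
--     prev = None
--     n = 0
--     for c in chars:
--         if prev is not None and c == prev: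
--             n += 1
--         else:
--             if prev is not None:
--                 runs.append((prev, n))
--             prev, n = c, 1
--     if prev is not None:
--         runs.append((prev, n))
--     return runs
--
--
-- def _paired(runs):
--     """True iff runs pair up as a 1-run followed by an equally long 0-run."""
--     while runs:
--         if len(runs) < 2:
--             return False
--         (a, n), (_, m) = runs[0], runs[1]
--         if a != "1" or n != m:
--             return False
--         runs = runs[2:]
--     return True
--
--
-- def same_length(txt):
--     return _paired(_runs([c for c in txt if c in "01"]))
-- ===== Notes on version B (the rewrite author's own statement) =====
-- stated objective: alternative
-- what changed: Replaces the signed counter + increasing flag with a staged pipeline: filter to the binary characters, run-length encode, then check the runs pair up as a one-run followed by an equally long zero-run.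
import Mathlib
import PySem

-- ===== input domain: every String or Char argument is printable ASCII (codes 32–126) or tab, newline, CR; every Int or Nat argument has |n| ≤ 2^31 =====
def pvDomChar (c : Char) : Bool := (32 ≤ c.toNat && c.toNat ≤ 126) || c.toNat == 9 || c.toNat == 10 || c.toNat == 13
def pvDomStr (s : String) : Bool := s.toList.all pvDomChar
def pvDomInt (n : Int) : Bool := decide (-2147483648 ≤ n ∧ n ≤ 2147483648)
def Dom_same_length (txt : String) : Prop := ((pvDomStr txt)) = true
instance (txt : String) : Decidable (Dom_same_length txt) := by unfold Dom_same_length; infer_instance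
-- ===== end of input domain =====

-- B changes the decomposition: filter + run-length encoding + pairwise run check instead of A's single counter/flag loop (alternative; same cost).

-- ===== PORT A =====
-- loop body of A: state = none once the loop has returned False, else some (count, increasing)
def stepA (s : Option (Int × Bool)) (c : Char) : Option (Int × Bool) :=
  match s with
  | none => none
  | some (count, increasing) =>
    if c == '1' then
      if !increasing then
        if count != 0 then none
        else some (count + 1, true)
      else some (count + 1, increasing)
    else if c == '0' then some (count - 1, false)
    else some (count, increasing)

def same_length (txt : String) : Bool :=
  match txt.toList.foldl stepA (some (0, true)) with
  | none => false
  | some (count, _) => count == 0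

-- ===== PORT B =====
-- _runs loop body: state = (runs so far, current char (none before first), current run length)
def runsStep (s : List (Char × Nat) × Option Char × Nat) (c : Char) :
    List (Char × Nat) × Option Char × Nat :=
  match s with
  | (rs, prev, n) =>
    match prev with
    | some p => if c == p then (rs, some p, n + 1) else (rs ++ [(p, n)], some c, 1)
    | none => (rs, some c, 1)

def bruns (l : List Char) : List (Char × Nat) :=
  match l.foldl runsStep ([], none, 0) with
  | (rs, none, _) => rs
  | (rs, some p, n) => rs ++ [(p, n)]

def paired : List (Char × Nat) → Bool
  | [] => true
  | [_] => false
  | (a, n) :: (_, m) :: rest => if a ≠ '1' ∨ n ≠ m then false else paired rest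

def same_length_alt (txt : String) : Bool :=
  paired (bruns (txt.toList.filter (fun c => c == '0' || c == '1')))

-- ===== PRECONDITION & SPEC =====
def Spec_same_length (txt : String) (out : Bool) : Prop := out = same_length_alt txt
instance (txt : String) (out : Bool) : Decidable (Spec_same_length txt out) := by
  unfold Spec_same_length; infer_instance

-- ===== CLAIM (what is proved, stated in full; the proofs are below) =====
def Claim_equal_same_length : Prop := ∀ (txt : String), Dom_same_length txt → Spec_same_length txt (same_length txt)

-- ===== LEMMAS AND PROOFS =====

-- proof-side recursive characterisation of a run in progress
def bfrom (p : Char) (n : Nat) : List Char → List (Char × Nat)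
  | [] => [(p, n)]
  | c :: l => if c = p then bfrom p (n + 1) l else (p, n) :: bfrom c 1 l

def finz (s : List (Char × Nat) × Option Char × Nat) : List (Char × Nat) :=
  match s with
  | (rs, none, _) => rs
  | (rs, some p, n) => rs ++ [(p, n)]

lemma finz_foldl : ∀ (l : List Char) (rs : List (Char × Nat)) (p : Char) (n : Nat),
    finz (l.foldl runsStep (rs, some p, n)) = rs ++ bfrom p n l := by
  intro l
  induction l with
  | nil => intro rs p n; simp [finz, bfrom]
  | cons c l ih =>
    intro rs p n
    by_cases h : c = p
    · simp [List.foldl, runsStep, h, bfrom, ih]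
    · simp [List.foldl, runsStep, h, bfrom, ih]

lemma bruns_cons (c : Char) (l : List Char) : bruns (c :: l) = bfrom c 1 l := by
  simp [bruns, List.foldl, runsStep]
  have := finz_foldl l [] c 1
  simp at this
  rcases h : l.foldl runsStep ([], some c, 1) with ⟨rs, prev, n⟩
  rw [h] at this
  cases prev <;> simp [finz] at this <;> simp [this]

lemma bfrom_head : ∀ (l : List Char) (p : Char) (n : Nat),
    ∃ m t, bfrom p n l = (p, m) :: t := by
  intro l
  induction l with
  | nil => intro p n; exact ⟨n, [], rfl⟩
  | cons c l ih =>
    intro p n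
    by_cases h : c = p
    · simpa [bfrom, h] using ih p (n + 1)
    · exact ⟨n, bfrom c 1 l, by simp [bfrom, h]⟩

lemma paired_head_ne_one {p : Char} (hp : p ≠ '1') (m : Nat) (t : List (Char × Nat)) :
    paired ((p, m) :: t) = false := by
  cases t with
  | nil => simp [paired]
  | cons x t => rcases x with ⟨b, m'⟩; simp [paired, hp]

lemma afold_none : ∀ (l : List Char), l.foldl stepA none = none := by
  intro l; induction l with
  | nil => rfl
  | cons c l ih => simpa [List.foldl, stepA] using ih

def Ares (s : Option (Int × Bool)) (l : List Char) : Bool :=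
  match l.foldl stepA s with
  | none => false
  | some (count, _) => count == 0

lemma Ares_none (l : List Char) : Ares none l = false := by
  simp [Ares, afold_none]

lemma Ares_neg : ∀ (l : List Char) (c : Int), (∀ x ∈ l, x = '0' ∨ x = '1') → c < 0 →
    Ares (some (c, false)) l = false := by
  intro l
  induction l with
  | nil => intro c _ hc; simp [Ares, List.foldl]; omega
  | cons x l ih =>
    intro c hb hc
    rcases hb x (by simp) with h | h
    · subst h
      have : Ares (some (c, false)) ('0' :: l) = Ares (some (c - 1, false)) l := by
        simp [Ares, List.foldl, stepA]
      rw [this]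
      exact ih (c - 1) (fun y hy => hb y (by simp [hy])) (by omega)
    · subst h
      have : Ares (some (c, false)) ('1' :: l) = Ares none l := by
        have hc0 : (c != 0) = true := by simp; omega
        simp [Ares, List.foldl, stepA, hc0]
      rw [this, Ares_none]

lemma main_pair : ∀ (N : Nat) (l : List Char), l.length ≤ N → (∀ x ∈ l, x = '0' ∨ x = '1') →
    ((∀ k : Nat, 1 ≤ k → Ares (some ((k : Int), true)) l = paired (bfrom '1' k l)) ∧
     (∀ k m : Nat, 1 ≤ k → 1 ≤ m →
       Ares (some ((k : Int) - (m : Int), false)) l = paired (('1', k) :: bfrom '0' m l))) := by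
  intro N
  induction N with
  | zero =>
    intro l hl _
    have : l = [] := List.eq_nil_of_length_eq_zero (Nat.le_zero.mp hl)
    subst this
    constructor
    · intro k hk
      have : ((k : Int) == 0) = false := by simp; omega
      simp [Ares, List.foldl, bfrom, paired, this]
    · intro k m hk hm
      by_cases h : k = m
      · subst h; simp [Ares, List.foldl, bfrom, paired]
      · have : ((k : Int) - (m : Int) == 0) = false := by simp; omega
        simp [Ares, List.foldl, bfrom, paired, this, h]
  | succ N ih =>
    intro l hl hb
    cases l with
    | nil =>
      constructor
      · intro k hk
        have : ((k : Int) == 0) = false := by simp; omega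
        simp [Ares, List.foldl, bfrom, paired, this]
      · intro k m hk hm
        by_cases h : k = m
        · subst h; simp [Ares, List.foldl, bfrom, paired]
        · have : ((k : Int) - (m : Int) == 0) = false := by simp; omega
          simp [Ares, List.foldl, bfrom, paired, this, h]
    | cons x t =>
      have ht : t.length ≤ N := by simpa using hl
      have hbt : ∀ y ∈ t, y = '0' ∨ y = '1' := fun y hy => hb y (by simp [hy])
      have iht := ih t ht hbt
      constructor
      · intro k hk
        rcases hb x (by simp) with h | h
        · subst h
          have hA : Ares (some ((k : Int), true)) ('0' :: t)
              = Ares (some ((k : Int) - (1 : Int), false)) t := by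
            simp [Ares, List.foldl, stepA]
          rw [hA]
          have := iht.2 k 1 hk (le_refl 1)
          simpa [bfrom] using this
        · subst h
          have hA : Ares (some ((k : Int), true)) ('1' :: t)
              = Ares (some (((k + 1 : Nat) : Int), true)) t := by
            simp [Ares, List.foldl, stepA]
          rw [hA]
          have := iht.1 (k + 1) (by omega)
          simpa [bfrom] using this
      · intro k m hk hm
        rcases hb x (by simp) with h | h
        · subst h
          have hA : Ares (some ((k : Int) - (m : Int), false)) ('0' :: t)
              = Ares (some ((k : Int) - ((m + 1 : Nat) : Int), false)) t := by
            have : (k : Int) - (m : Int) - 1 = (k : Int) - ((m + 1 : Nat) : Int) := by push_cast; ring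
            simp [Ares, List.foldl, stepA, this]
          rw [hA]
          have := iht.2 k (m + 1) hk (by omega)
          simpa [bfrom] using this
        · subst h
          by_cases hkm : k = m
          · subst hkm
            have hA : Ares (some ((k : Int) - (k : Int), false)) ('1' :: t)
                = Ares (some (((1 : Nat) : Int), true)) t := by
              simp [Ares, List.foldl, stepA]
            rw [hA]
            have := iht.1 1 (le_refl 1)
            rw [this]
            simp [bfrom, paired]
          · have hc0 : ((k : Int) - (m : Int) != 0) = true := by simp; omega
            have hA : Ares (some ((k : Int) - (m : Int), false)) ('1' :: t) = Ares none t := by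
              simp [Ares, List.foldl, stepA, hc0]
            rw [hA, Ares_none]
            simp [bfrom, paired, hkm]

lemma main_binary (l : List Char) (hb : ∀ x ∈ l, x = '0' ∨ x = '1') :
    Ares (some (0, true)) l = paired (bruns l) := by
  cases l with
  | nil => simp [Ares, List.foldl, bruns, paired]
  | cons x t =>
    have hbt : ∀ y ∈ t, y = '0' ∨ y = '1' := fun y hy => hb y (by simp [hy])
    rcases hb x (by simp) with h | h
    · subst h
      have hA : Ares (some (0, true)) ('0' :: t) = Ares (some (-1, false)) t := by
        simp [Ares, List.foldl, stepA]
      rw [hA, Ares_neg t (-1) hbt (by omega), bruns_cons]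
      obtain ⟨m, t', ht'⟩ := bfrom_head t '0' 1
      rw [ht', paired_head_ne_one (by decide) m t']
    · subst h
      have hA : Ares (some (0, true)) ('1' :: t) = Ares (some ((1 : Int), true)) t := by
        simp [Ares, List.foldl, stepA]
      rw [hA, bruns_cons]
      exact (main_pair t.length t (le_refl _) hbt).1 1 (le_refl 1)

lemma afold_filter : ∀ (l : List Char) (s : Option (Int × Bool)),
    l.foldl stepA s = (l.filter (fun c => c == '0' || c == '1')).foldl stepA s := by
  intro l
  induction l with
  | nil => intro s; rfl
  | cons c l ih =>
    intro s
    by_cases h0 : c = '0'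
    · subst h0; simp [List.filter, List.foldl, ih]
    · by_cases h1 : c = '1'
      · subst h1; simp [List.filter, List.foldl, ih]
      · have hs : stepA s c = s := by
          cases s with
          | none => rfl
          | some p => rcases p with ⟨cnt, inc⟩; simp [stepA, h0, h1]
        have hf : (c == '0' || c == '1') = false := by simp [h0, h1]
        simp [List.filter, hf, List.foldl, hs, ih]

-- ===== VERDICT (by name: the statement is the Claim_ definition above) =====
theorem same_length_spec : Claim_equal_same_length := by
  intro txt _
  unfold Spec_same_length same_length same_length_alt
  have h1 : txt.toList.foldl stepA (some (0, true))
      = (txt.toList.filter (fun c => c == '0' || c == '1')).foldl stepA (some (0, true)) :=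
    afold_filter txt.toList (some (0, true))
  rw [h1]
  have hb : ∀ x ∈ txt.toList.filter (fun c => c == '0' || c == '1'), x = '0' ∨ x = '1' := by
    intro x hx
    simp [List.mem_filter] at hx
    tauto
  have := main_binary (txt.toList.filter (fun c => c == '0' || c == '1')) hb
  simpa [Ares] using this
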